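-- pv_equiv track=rewrite | github.com/raullenchai/vllm-mlx | vllm_mlx/service/postprocessor.py | _has_partial_calling_tool_marker
-- ===== SOURCE A (Python) =====
-- def _has_partial_calling_tool_marker(text: str) -> bool:
--     """Return True when a stream tail may become `Calling tool:`."""
--     marker = "Calling tool:"
--     tail = text.rstrip()
--     if tail.endswith("[") and _starts_current_line(tail, len(tail) - 1):
--         return True
--     for i in range(1, len(marker)):
--         partial = marker[:i]
--         if tail.endswith(partial):
--             start = len(tail) - len(partial)
--             if _starts_current_line(tail, start):
--                 return True
--         if tail.endswith(f"[{partial}"):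
--             start = len(tail) - len(partial) - 1
--             if _starts_current_line(tail, start):
--                 return True
--     return False
--
-- def _starts_current_line(text: str, start: int) -> bool:
--     """Return True when start is preceded only by whitespace on its line."""
--     line_start = max(text.rfind("\n", 0, start), text.rfind("\r", 0, start)) + 1
--     return text[line_start:start].strip() == ""
-- ===== SOURCE B (Python) =====
-- def _has_partial_calling_tool_marker(text: str) -> bool:
--     """Return True when a stream tail may become `Calling tool:`."""
--     marker = "Calling tool:"
--     tail = text.rstrip()
--     nl = max(tail.rfind("\n"), tail.rfind("\r")) + 1
--     content = tail[nl:].lstrip()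
--     if not content:
--         return False
--     if content == "[":
--         return True
--     stripped = content[1:] if content.startswith("[") else content
--     return bool(stripped) and stripped != marker and marker.startswith(stripped)
-- ===== Notes on version B (the rewrite author's own statement) =====
-- stated objective: simpler
-- what changed: A enumerates all 25 partial-marker candidates ('[', each proper prefix of 'Calling tool:', and '[' + prefix) and tests tail.endswith plus a line-start scan for each; B extracts the stripped content of the current line once and decides with a single prefix comparison against the marker.
import Mathlib
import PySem

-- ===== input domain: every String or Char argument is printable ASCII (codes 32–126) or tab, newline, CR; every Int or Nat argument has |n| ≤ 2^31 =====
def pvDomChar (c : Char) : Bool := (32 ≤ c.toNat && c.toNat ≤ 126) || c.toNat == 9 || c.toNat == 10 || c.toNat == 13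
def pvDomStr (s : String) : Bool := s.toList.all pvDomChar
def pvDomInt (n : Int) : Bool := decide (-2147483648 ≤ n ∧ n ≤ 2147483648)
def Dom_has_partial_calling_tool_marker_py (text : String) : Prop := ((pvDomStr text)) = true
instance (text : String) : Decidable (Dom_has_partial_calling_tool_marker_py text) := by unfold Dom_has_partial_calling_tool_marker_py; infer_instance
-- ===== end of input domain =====

-- B replaces A's 25-fold prefix-enumeration loop (endswith + line-start check per prefix) by
-- extracting the current line's content once and doing a single prefix comparison against the marker.

-- ===== PORT A =====
-- port of helper _starts_current_line
def pv_starts_current_line (text : List Char) (start : Int) : Bool :=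
  let lineStart := max (PySem.Chars.rfindFrom text ['\n'] 0 (some start))
                       (PySem.Chars.rfindFrom text ['\r'] 0 (some start)) + 1
  PySem.Chars.strip (PySem.Chars.slice text (some lineStart) (some start)) == []

def has_partial_calling_tool_marker_py (text : String) : Bool :=
  let marker := "Calling tool:".toList
  let tail := PySem.Chars.rstrip text.toList
  if PySem.Chars.endswith tail ['['] && pv_starts_current_line tail ((tail.length : Int) - 1) then
    true
  else
    (PySem.List.pyRange 1 (marker.length : Int) 1).foldl
      (fun acc i =>
        acc ||
          (let part := PySem.Chars.slice marker none (some i)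
           (PySem.Chars.endswith tail part &&
              pv_starts_current_line tail ((tail.length : Int) - (part.length : Int))) ||
           (PySem.Chars.endswith tail ('[' :: part) &&
              pv_starts_current_line tail ((tail.length : Int) - (part.length : Int) - 1))))
      false

-- ===== PORT B =====
def has_partial_calling_tool_marker_py_alt (text : String) : Bool :=
  let marker := "Calling tool:".toList
  let tail := PySem.Chars.rstrip text.toList
  let nl := max (PySem.Chars.rfind tail ['\n']) (PySem.Chars.rfind tail ['\r']) + 1
  let content := PySem.Chars.lstrip (PySem.Chars.slice tail (some nl) none)
  if content.isEmpty then false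
  else if content == ['['] then true
  else
    let stripped := if PySem.Chars.startswith content ['['] then
        PySem.Chars.slice content (some 1) none
      else content
    !stripped.isEmpty && stripped != marker && PySem.Chars.startswith marker stripped

-- ===== PRECONDITION & SPEC =====
def Spec_has_partial_calling_tool_marker_py (text : String) (out : Bool) : Prop := out = has_partial_calling_tool_marker_py_alt text
instance (text : String) (out : Bool) : Decidable (Spec_has_partial_calling_tool_marker_py text out) := by unfold Spec_has_partial_calling_tool_marker_py; infer_instance

-- ===== CLAIM (what is proved, stated in full; the proofs are below) =====
def Claim_equal_has_partial_calling_tool_marker_py : Prop := ∀ (text : String), Dom_has_partial_calling_tool_marker_py text → Spec_has_partial_calling_tool_marker_py text (has_partial_calling_tool_marker_py text)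

-- ===== LEMMAS AND PROOFS =====

def pvNoNL (l : List Char) : Prop := ∀ c ∈ l, c ≠ '\n' ∧ c ≠ '\r'
def pvPreOK (pre : List Char) : Prop := pre = [] ∨ ∃ u c, pre = u ++ [c] ∧ (c = '\n' ∨ c = '\r')

theorem pv_decomp (t : List Char) : ∃ pre line, t = pre ++ line ∧ pvNoNL line ∧ pvPreOK pre := by
  induction t using List.reverseRecOn with
  | nil => exact ⟨[], [], rfl, by simp [pvNoNL], Or.inl rfl⟩
  | append_singleton t c ih =>
    obtain ⟨pre, line, rfl, hnl, hpre⟩ := ih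
    by_cases hc : c = '\n' ∨ c = '\r'
    · exact ⟨pre ++ line ++ [c], [], by simp, by simp [pvNoNL], Or.inr ⟨pre ++ line, c, rfl, hc⟩⟩
    · refine ⟨pre, line ++ [c], by simp, ?_, hpre⟩
      intro d hd
      rcases List.mem_append.1 hd with h | h
      · exact hnl d h
      · simp at h; subst h; constructor <;> intro h <;> exact hc (by simp [h])

theorem pv_single_prefix (c : Char) (l : List Char) : [c].isPrefixOf l = (l.head? == some c) := by
  cases l with
  | nil => simp [List.isPrefixOf]
  | cons h t => simp [List.isPrefixOf, BEq.comm]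

theorem pv_go_high (s : List Char) (c : Char) (n m : Nat) (hm : m ≤ n)
    (h : ∀ j, m < j → j ≤ n → [c].isPrefixOf (s.drop j) = false) :
    PySem.Chars.rfind.go s [c] n = PySem.Chars.rfind.go s [c] m := by
  induction n with
  | zero => interval_cases m; rfl
  | succ k ih =>
    by_cases hm' : m = k + 1
    · subst hm'; rfl
    · have hmk : m ≤ k := by omega
      rw [show PySem.Chars.rfind.go s [c] (k+1) =
        (if [c].isPrefixOf (s.drop (k+1)) then (((k+1 : Nat)) : Int) else PySem.Chars.rfind.go s [c] k) from rfl]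
      rw [h (k+1) (by omega) (by omega)]
      simp only [Bool.false_eq_true, if_false]
      exact ih hmk (fun j h1 h2 => h j h1 (by omega))

theorem pv_go_congr (s t : List Char) (c : Char) (n : Nat)
    (h : ∀ j ≤ n, [c].isPrefixOf (s.drop j) = [c].isPrefixOf (t.drop j)) :
    PySem.Chars.rfind.go s [c] n = PySem.Chars.rfind.go t [c] n := by
  induction n with
  | zero =>
    have := h 0 le_rfl; simp only [List.drop_zero] at this
    show (if [c].isPrefixOf s then (0:Int) else -1) = (if [c].isPrefixOf t then (0:Int) else -1)
    rw [this]
  | succ k ih =>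
    show (if [c].isPrefixOf (s.drop (k+1)) then (((k+1 : Nat)) : Int) else PySem.Chars.rfind.go s [c] k)
      = (if [c].isPrefixOf (t.drop (k+1)) then (((k+1 : Nat)) : Int) else PySem.Chars.rfind.go t [c] k)
    rw [h (k+1) le_rfl, ih (fun j hj => h j (by omega))]

theorem pv_go_mem (s : List Char) (c : Char) (n : Nat) :
    PySem.Chars.rfind.go s [c] n = -1 ∨
      (0 ≤ PySem.Chars.rfind.go s [c] n ∧
        [c].isPrefixOf (s.drop (PySem.Chars.rfind.go s [c] n).toNat) = true) := by
  induction n with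
  | zero =>
    have hgo : PySem.Chars.rfind.go s [c] 0 = (if [c].isPrefixOf s then (0:Int) else -1) := rfl
    rw [hgo]
    by_cases h : [c].isPrefixOf s
    · right; rw [if_pos h]; exact ⟨le_refl 0, by simpa using h⟩
    · left; simp [h]
  | succ k ih =>
    have hgo : PySem.Chars.rfind.go s [c] (k+1)
      = (if [c].isPrefixOf (s.drop (k+1)) then (((k+1:Nat)):Int) else PySem.Chars.rfind.go s [c] k) := rfl
    rw [hgo]
    by_cases h : [c].isPrefixOf (s.drop (k+1))
    · right; rw [if_pos h]; exact ⟨by positivity, by simpa using h⟩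
    · rw [if_neg (by simp [h])]; exact ih

theorem pv_rfind_lt (s : List Char) (c : Char) :
    PySem.Chars.rfind s [c] < (s.length : Int) ∨ PySem.Chars.rfind s [c] = -1 := by
  unfold PySem.Chars.rfind
  rcases pv_go_mem s c s.length with h | ⟨h0, hp⟩
  · right; exact h
  · left
    have hne : s.drop (PySem.Chars.rfind.go s [c] s.length).toNat ≠ [] := by
      intro he; rw [he] at hp; simp [List.isPrefixOf] at hp
    have := List.drop_eq_nil_iff.not.1 (by simpa using hne)
    omega

theorem pv_rfind_append (u v : List Char) (c : Char) (hv : c ∉ v) :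
    PySem.Chars.rfind (u ++ v) [c] = PySem.Chars.rfind u [c] := by
  show PySem.Chars.rfind.go _ _ (u ++ v).length = PySem.Chars.rfind.go _ _ u.length
  have hlen : (u ++ v).length = u.length + v.length := by simp
  rw [hlen]
  have h1 : PySem.Chars.rfind.go (u ++ v) [c] (u.length + v.length)
      = PySem.Chars.rfind.go (u ++ v) [c] u.length := by
    apply pv_go_high _ _ _ _ (by omega)
    intro j h1 h2
    rw [pv_single_prefix]
    have : (u ++ v).drop j = v.drop (j - u.length) := by
      rw [List.drop_append, List.drop_of_length_le (by omega)]; simp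
    rw [this]
    cases hd : (v.drop (j - u.length)).head? with
    | none => simp
    | some d =>
      have : d ∈ v := List.mem_of_mem_drop (List.mem_of_mem_head? hd)
      simp only [beq_eq_false_iff_ne, ne_eq, Option.some.injEq]
      intro he; subst he; exact hv this
  rw [h1]
  apply pv_go_congr
  intro j hj
  rw [pv_single_prefix, pv_single_prefix]
  rcases lt_or_eq_of_le hj with hlt | heq
  · have : (u ++ v).drop j = u.drop j ++ v := by
      rw [List.drop_append, Nat.sub_eq_zero_of_le (le_of_lt hlt), List.drop_zero]
    rw [this]
    have hne : u.drop j ≠ [] := by simpa [List.drop_eq_nil_iff] using (by omega : ¬ u.length ≤ j)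
    rw [List.head?_append_of_ne_nil _ hne]
  · subst heq
    rw [List.drop_left, List.drop_length]
    have hf : (v.head? == some c) = false := by
      cases hd : v.head? with
      | none => rfl
      | some d =>
        have hm : d ∈ v := List.mem_of_mem_head? hd
        simp only [beq_eq_false_iff_ne, ne_eq, Option.some.injEq]
        intro he; subst he; exact hv hm
    simp [hf]

theorem pv_go_last (s : List Char) (c : Char) (n : Nat) (h : [c].isPrefixOf (s.drop n) = true) :
    PySem.Chars.rfind.go s [c] n = n := by
  cases n with
  | zero => show (if [c].isPrefixOf (s.drop 0) then (0:Int) else -1) = 0; simp_all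
  | succ k =>
    show (if [c].isPrefixOf (s.drop (k+1)) then (((k+1:Nat)):Int) else _) = _
    simp [h]

theorem pv_rfind_concat (u : List Char) (c : Char) :
    PySem.Chars.rfind (u ++ [c]) [c] = (u.length : Int) := by
  show PySem.Chars.rfind.go _ _ (u ++ [c]).length = _
  have hlen : (u ++ [c]).length = u.length + 1 := by simp
  rw [hlen]
  rw [show PySem.Chars.rfind.go (u ++ [c]) [c] (u.length + 1)
    = (if [c].isPrefixOf ((u ++ [c]).drop (u.length+1)) then (((u.length+1:Nat)):Int)
       else PySem.Chars.rfind.go (u ++ [c]) [c] u.length) from rfl]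
  rw [List.drop_eq_nil_iff.2 (by simp)]
  simp only [List.isPrefixOf, Bool.false_eq_true, if_false]
  rw [pv_go_last]
  rw [List.drop_left]
  simp [List.isPrefixOf]

theorem pv_linestart (pre : List Char) (hpre : pvPreOK pre) :
    max (PySem.Chars.rfind pre ['\n']) (PySem.Chars.rfind pre ['\r']) + 1 = (pre.length : Int) := by
  rcases hpre with h | ⟨u, c, rfl, hc⟩
  · subst h; decide
  · have hlen : ((u ++ [c]).length : Int) = u.length + 1 := by simp
    rcases hc with rfl | rfl
    · rw [pv_rfind_concat, pv_rfind_append u ['\n'] '\r' (by decide)]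
      rcases pv_rfind_lt u '\r' with h | h <;> rw [hlen] <;> omega
    · rw [pv_rfind_concat, pv_rfind_append u ['\r'] '\n' (by decide)]
      rcases pv_rfind_lt u '\n' with h | h <;> rw [hlen] <;> omega

theorem pv_rfindFrom_zero (s sub : List Char) (start : Int) (h0 : 0 ≤ start) (hle : start ≤ (s.length : Int)) :
    PySem.Chars.rfindFrom s sub 0 (some start) = PySem.Chars.rfind (s.take start.toNat) sub := by
  show (if (if ((s.length:Int)) < start then ((s.length:Int)) else if start < 0 then (if start + ((s.length:Int)) < 0 then 0 else start + ((s.length:Int))) else start) < 0 then (-1:Int)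
        else
          if PySem.Chars.rfind (List.take (if ((s.length:Int)) < start then ((s.length:Int)) else if start < 0 then (if start + ((s.length:Int)) < 0 then 0 else start + ((s.length:Int))) else start).toNat s) sub = -1 then -1
          else 0 + PySem.Chars.rfind (List.take (if ((s.length:Int)) < start then ((s.length:Int)) else if start < 0 then (if start + ((s.length:Int)) < 0 then 0 else start + ((s.length:Int))) else start).toNat s) sub)
      = PySem.Chars.rfind (List.take start.toNat s) sub
  rw [show (if ((s.length:Int)) < start then ((s.length:Int)) else if start < 0 then (if start + ((s.length:Int)) < 0 then 0 else start + ((s.length:Int))) else start) = start from by split_ifs <;> omega]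
  rw [if_neg (by omega)]
  split
  · next h => exact h.symm
  · omega

theorem pv_strip_eq_nil_iff (w : List Char) :
    PySem.Chars.strip w = [] ↔ ∀ c ∈ w, PySem.Chars.isspace c = true := by
  unfold PySem.Chars.strip PySem.Chars.rstrip PySem.Chars.lstrip
  rw [List.reverse_eq_nil_iff, List.dropWhile_eq_nil_iff]
  constructor
  · intro h c hc
    rcases List.mem_append.1 (by
        rw [List.takeWhile_append_dropWhile (p := PySem.Chars.isspace)] at *; exact hc :
        c ∈ w.takeWhile PySem.Chars.isspace ++ w.dropWhile PySem.Chars.isspace) with hm | hm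
    · exact List.mem_takeWhile_imp hm
    · exact h c (by simpa using hm)
  · intro h c hc
    have : c ∈ w.takeWhile PySem.Chars.isspace ++ w.dropWhile PySem.Chars.isspace := by
      exact List.mem_append.2 (Or.inr (by simpa using hc))
    rw [List.takeWhile_append_dropWhile] at this
    exact h c this

theorem pv_lstrip_append (w q : List Char) (hw : ∀ c ∈ w, PySem.Chars.isspace c = true)
    (hq : PySem.Chars.lstrip q = q) : PySem.Chars.lstrip (w ++ q) = q := by
  unfold PySem.Chars.lstrip at *
  rw [List.dropWhile_append, List.dropWhile_eq_nil_iff.2 hw]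
  simpa using hq

theorem pv_scl_val (pre line w q : List Char) (hnl : pvNoNL line) (hpre : pvPreOK pre)
    (hsplit : line = w ++ q) :
    pv_starts_current_line (pre ++ line) (((pre.length + w.length : Nat) : Int))
      = (PySem.Chars.strip w == []) := by
  subst hsplit
  have hwnl : ∀ c, c ∈ w → ¬ (c = '\n' ∨ c = '\r') := by
    intro c hc
    have := hnl c (List.mem_append.2 (Or.inl hc))
    tauto
  unfold pv_starts_current_line
  have hle : ((pre.length + w.length : Nat) : Int) ≤ ((pre ++ (w ++ q)).length : Int) := by
    simp
  rw [pv_rfindFrom_zero _ _ _ (by positivity) hle, pv_rfindFrom_zero _ _ _ (by positivity) hle]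
  rw [Int.toNat_natCast]
  rw [show pre ++ (w ++ q) = (pre ++ w) ++ q from by simp]
  rw [List.take_left' (by simp)]
  rw [pv_rfind_append pre w '\n' (fun h => hwnl _ h (Or.inl rfl)),
      pv_rfind_append pre w '\r' (fun h => hwnl _ h (Or.inr rfl))]
  rw [pv_linestart pre hpre]
  show (PySem.Chars.strip (PySem.Chars.slice (pre ++ w ++ q) (some ((pre.length : Nat) : Int))
      (some ((pre.length + w.length : Nat) : Int))) == []) = (PySem.Chars.strip w == [])
  rw [PySem.Chars.slice_eq_listSlice]
  rw [PySem.List.slice_natCast]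
  rw [List.append_assoc, List.drop_left]
  rw [Nat.add_sub_cancel_left]
  rw [List.take_left' rfl]

theorem pv_check_eq (pre line q : List Char) (hnl : pvNoNL line) (hpre : pvPreOK pre)
    (hqnl : pvNoNL q) (hqh : PySem.Chars.lstrip q = q) :
    (PySem.Chars.endswith (pre ++ line) q &&
      pv_starts_current_line (pre ++ line) (((pre ++ line).length : Int) - (q.length : Int)))
      = (PySem.Chars.lstrip line == q) := by
  by_cases hbq : PySem.Chars.lstrip line = q
  · -- both sides true
    have hdecomp : line = line.takeWhile PySem.Chars.isspace ++ q := by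
      conv_lhs => rw [← List.takeWhile_append_dropWhile (p := PySem.Chars.isspace) (l := line)]
      rw [show List.dropWhile PySem.Chars.isspace line = q from hbq]
    set w := line.takeWhile PySem.Chars.isspace with hw
    have hwws : ∀ c ∈ w, PySem.Chars.isspace c = true := fun c hc => List.mem_takeWhile_imp hc
    have hend : PySem.Chars.endswith (pre ++ line) q = true := by
      rw [PySem.Chars.endswith_iff]
      exact (List.suffix_append w q).trans (by rw [← hdecomp]; exact List.suffix_append pre line)
    have hstart : ((pre ++ line).length : Int) - (q.length : Int) = ((pre.length + w.length : Nat) : Int) := by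
      have : line.length = w.length + q.length := by rw [hdecomp]; simp
      simp [this]; omega
    rw [hend, hstart, pv_scl_val pre line w q hnl hpre hdecomp]
    simp [(pv_strip_eq_nil_iff w).2 hwws, hbq]
  · -- both sides false
    rw [beq_eq_false_iff_ne.2 hbq]
    by_cases hend : PySem.Chars.endswith (pre ++ line) q = true
    · have hsuf : q <:+ pre ++ line := (PySem.Chars.endswith_iff _ _).1 hend
      have hqlen : q.length ≤ (pre ++ line).length := hsuf.length_le
      by_cases hql : q.length ≤ line.length
      · -- q is a suffix of line
        have hqline : q <:+ line := by
          have hqdrop := List.suffix_iff_eq_drop.1 hsuf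
          rw [List.drop_append] at hqdrop
          rw [List.drop_of_length_le (by simp only [List.length_append]; omega)] at hqdrop
          rw [List.nil_append] at hqdrop
          rw [hqdrop]; exact List.drop_suffix _ _
        obtain ⟨w, hdecomp⟩ := hqline
        have hstart : ((pre ++ line).length : Int) - (q.length : Int) = ((pre.length + w.length : Nat) : Int) := by
          have : line.length = w.length + q.length := by rw [← hdecomp]; simp
          simp [this]; omega
        rw [hend, hstart, pv_scl_val pre line w q hnl hpre hdecomp.symm]
        simp only [Bool.true_and]
        rw [beq_eq_false_iff_ne]
        intro hstrip
        exact hbq (by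
          rw [← hdecomp]
          exact pv_lstrip_append w q ((pv_strip_eq_nil_iff w).1 hstrip) hqh)
      · -- impossible: q would contain the line break ending pre
        exfalso
        have hpre1 : pre ≠ [] := by
          intro h; subst h; simp at hqlen; omega
        rcases hpre with h | ⟨u, c, hc, hcnl⟩
        · exact hpre1 h
        have hqdrop : q = List.drop ((pre ++ line).length - q.length) (pre ++ line) :=
          List.suffix_iff_eq_drop.1 hsuf
        have hklt : (pre ++ line).length - q.length ≤ u.length := by
          have := congrArg List.length hc; simp at this ⊢; omega
        have hcq : c ∈ q := by
          rw [hqdrop, hc]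
          rw [show (u ++ [c]) ++ line = u ++ ([c] ++ line) from by simp]
          rw [List.drop_append]
          refine List.mem_append.2 (Or.inr ?_)
          rw [Nat.sub_eq_zero_of_le (by
            have := hklt; simp only [hc] at this ⊢; simp at this ⊢; omega)]
          simp
        have := hqnl c hcq
        tauto
    · simp [Bool.not_eq_true] at hend
      rw [hend]; rfl

def pvContentCheckB (c : List Char) : Bool :=
  if c.isEmpty then false
  else if c == ['['] then true
  else
    let stripped := if PySem.Chars.startswith c ['['] then PySem.Chars.slice c (some 1) none else c
    !stripped.isEmpty && stripped != "Calling tool:".toList && PySem.Chars.startswith "Calling tool:".toList stripped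

def pvOrTree (c : List Char) : Bool :=
  (((((((((((((c == ['C']) || (c == ['[', 'C'])) || ((c == ['C', 'a']) || (c == ['[', 'C', 'a']))) || ((c == ['C', 'a', 'l']) || (c == ['[', 'C', 'a', 'l']))) || ((c == ['C', 'a', 'l', 'l']) || (c == ['[', 'C', 'a', 'l', 'l']))) || ((c == ['C', 'a', 'l', 'l', 'i']) || (c == ['[', 'C', 'a', 'l', 'l', 'i']))) || ((c == ['C', 'a', 'l', 'l', 'i', 'n']) || (c == ['[', 'C', 'a', 'l', 'l', 'i', 'n']))) || ((c == ['C', 'a', 'l', 'l', 'i', 'n', 'g']) || (c == ['[', 'C', 'a', 'l', 'l', 'i', 'n', 'g']))) || ((c == ['C', 'a', 'l', 'l', 'i', 'n', 'g', ' ']) || (c == ['[', 'C', 'a', 'l', 'l', 'i', 'n', 'g', ' ']))) || ((c == ['C', 'a', 'l', 'l', 'i', 'n', 'g', ' ', 't']) || (c == ['[', 'C', 'a', 'l', 'l', 'i', 'n', 'g', ' ', 't']))) || ((c == ['C', 'a', 'l', 'l', 'i', 'n', 'g', ' ', 't', 'o']) || (c == ['[', 'C', 'a', 'l', 'l', 'i',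 'n', 'g', ' ', 't', 'o']))) || ((c == ['C', 'a', 'l', 'l', 'i', 'n', 'g', ' ', 't', 'o', 'o']) || (c == ['[', 'C', 'a', 'l', 'l', 'i', 'n', 'g', ' ', 't', 'o', 'o']))) || ((c == ['C', 'a', 'l', 'l', 'i', 'n', 'g', ' ', 't', 'o', 'o', 'l']) || (c == ['[', 'C', 'a', 'l', 'l', 'i', 'n', 'g', ' ', 't', 'o', 'o', 'l'])))

theorem pv_A_val (pre line : List Char) (hnl : pvNoNL line) (hpre : pvPreOK pre) :
    (if PySem.Chars.endswith (pre ++ line) ['['] && pv_starts_current_line (pre ++ line) (((pre ++ line).length : Int) - 1) then true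
      else
        (PySem.List.pyRange 1 (("Calling tool:".toList.length : Nat) : Int) 1).foldl
          (fun acc i =>
            acc ||
              (let part := PySem.Chars.slice "Calling tool:".toList none (some i)
               (PySem.Chars.endswith (pre ++ line) part &&
                  pv_starts_current_line (pre ++ line) (((pre ++ line).length : Int) - (part.length : Int))) ||
               (PySem.Chars.endswith (pre ++ line) ('[' :: part) &&
                  pv_starts_current_line (pre ++ line) (((pre ++ line).length : Int) - (part.length : Int) - 1))))
          false)
      = (if PySem.Chars.lstrip line == ['['] then true else pvOrTree (PySem.Chars.lstrip line)) := by
  rw [show PySem.List.pyRange 1 (("Calling tool:".toList.length : Nat) : Int) 1 = [1,2,3,4,5,6,7,8,9,10,11,12] from by decide]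
  simp only [List.foldl_cons, List.foldl_nil, Bool.false_or]
  rw [show PySem.Chars.slice "Calling tool:".toList none (some 1) = ['C'] from by decide]
  rw [show PySem.Chars.slice "Calling tool:".toList none (some 2) = ['C', 'a'] from by decide]
  rw [show PySem.Chars.slice "Calling tool:".toList none (some 3) = ['C', 'a', 'l'] from by decide]
  rw [show PySem.Chars.slice "Calling tool:".toList none (some 4) = ['C', 'a', 'l', 'l'] from by decide]
  rw [show PySem.Chars.slice "Calling tool:".toList none (some 5) = ['C', 'a', 'l', 'l', 'i'] from by decide]
  rw [show PySem.Chars.slice "Calling tool:".toList none (some 6) = ['C', 'a', 'l', 'l', 'i', 'n'] from by decide]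
  rw [show PySem.Chars.slice "Calling tool:".toList none (some 7) = ['C', 'a', 'l', 'l', 'i', 'n', 'g'] from by decide]
  rw [show PySem.Chars.slice "Calling tool:".toList none (some 8) = ['C', 'a', 'l', 'l', 'i', 'n', 'g', ' '] from by decide]
  rw [show PySem.Chars.slice "Calling tool:".toList none (some 9) = ['C', 'a', 'l', 'l', 'i', 'n', 'g', ' ', 't'] from by decide]
  rw [show PySem.Chars.slice "Calling tool:".toList none (some 10) = ['C', 'a', 'l', 'l', 'i', 'n', 'g', ' ', 't', 'o'] from by decide]
  rw [show PySem.Chars.slice "Calling tool:".toList none (some 11) = ['C', 'a', 'l', 'l', 'i', 'n', 'g', ' ', 't', 'o', 'o'] from by decide]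
  rw [show PySem.Chars.slice "Calling tool:".toList none (some 12) = ['C', 'a', 'l', 'l', 'i', 'n', 'g', ' ', 't', 'o', 'o', 'l'] from by decide]
  rw [show ∀ a : Int, a - ((['C'].length : Nat) : Int) - 1 = a - ((['[', 'C'].length : Nat) : Int) from fun a => by simp; omega]
  rw [pv_check_eq pre line ['[', 'C'] hnl hpre (fun c hc => by fin_cases hc <;> simp) (by decide)]
  rw [show ∀ a : Int, a - ((['C', 'a'].length : Nat) : Int) - 1 = a - ((['[', 'C', 'a'].length : Nat) : Int) from fun a => by simp; omega]
  rw [pv_check_eq pre line ['[', 'C', 'a'] hnl hpre (fun c hc => by fin_cases hc <;> simp) (by decide)]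
  rw [show ∀ a : Int, a - ((['C', 'a', 'l'].length : Nat) : Int) - 1 = a - ((['[', 'C', 'a', 'l'].length : Nat) : Int) from fun a => by simp; omega]
  rw [pv_check_eq pre line ['[', 'C', 'a', 'l'] hnl hpre (fun c hc => by fin_cases hc <;> simp) (by decide)]
  rw [show ∀ a : Int, a - ((['C', 'a', 'l', 'l'].length : Nat) : Int) - 1 = a - ((['[', 'C', 'a', 'l', 'l'].length : Nat) : Int) from fun a => by simp; omega]
  rw [pv_check_eq pre line ['[', 'C', 'a', 'l', 'l'] hnl hpre (fun c hc => by fin_cases hc <;> simp) (by decide)]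
  rw [show ∀ a : Int, a - ((['C', 'a', 'l', 'l', 'i'].length : Nat) : Int) - 1 = a - ((['[', 'C', 'a', 'l', 'l', 'i'].length : Nat) : Int) from fun a => by simp; omega]
  rw [pv_check_eq pre line ['[', 'C', 'a', 'l', 'l', 'i'] hnl hpre (fun c hc => by fin_cases hc <;> simp) (by decide)]
  rw [show ∀ a : Int, a - ((['C', 'a', 'l', 'l', 'i', 'n'].length : Nat) : Int) - 1 = a - ((['[', 'C', 'a', 'l', 'l', 'i', 'n'].length : Nat) : Int) from fun a => by simp; omega]
  rw [pv_check_eq pre line ['[', 'C', 'a', 'l', 'l', 'i', 'n'] hnl hpre (fun c hc => by fin_cases hc <;> simp) (by decide)]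
  rw [show ∀ a : Int, a - ((['C', 'a', 'l', 'l', 'i', 'n', 'g'].length : Nat) : Int) - 1 = a - ((['[', 'C', 'a', 'l', 'l', 'i', 'n', 'g'].length : Nat) : Int) from fun a => by simp; omega]
  rw [pv_check_eq pre line ['[', 'C', 'a', 'l', 'l', 'i', 'n', 'g'] hnl hpre (fun c hc => by fin_cases hc <;> simp) (by decide)]
  rw [show ∀ a : Int, a - ((['C', 'a', 'l', 'l', 'i', 'n', 'g', ' '].length : Nat) : Int) - 1 = a - ((['[', 'C', 'a', 'l', 'l', 'i', 'n', 'g', ' '].length : Nat) : Int) from fun a => by simp; omega]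
  rw [pv_check_eq pre line ['[', 'C', 'a', 'l', 'l', 'i', 'n', 'g', ' '] hnl hpre (fun c hc => by fin_cases hc <;> simp) (by decide)]
  rw [show ∀ a : Int, a - ((['C', 'a', 'l', 'l', 'i', 'n', 'g', ' ', 't'].length : Nat) : Int) - 1 = a - ((['[', 'C', 'a', 'l', 'l', 'i', 'n', 'g', ' ', 't'].length : Nat) : Int) from fun a => by simp; omega]
  rw [pv_check_eq pre line ['[', 'C', 'a', 'l', 'l', 'i', 'n', 'g', ' ', 't'] hnl hpre (fun c hc => by fin_cases hc <;> simp) (by decide)]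
  rw [show ∀ a : Int, a - ((['C', 'a', 'l', 'l', 'i', 'n', 'g', ' ', 't', 'o'].length : Nat) : Int) - 1 = a - ((['[', 'C', 'a', 'l', 'l', 'i', 'n', 'g', ' ', 't', 'o'].length : Nat) : Int) from fun a => by simp; omega]
  rw [pv_check_eq pre line ['[', 'C', 'a', 'l', 'l', 'i', 'n', 'g', ' ', 't', 'o'] hnl hpre (fun c hc => by fin_cases hc <;> simp) (by decide)]
  rw [show ∀ a : Int, a - ((['C', 'a', 'l', 'l', 'i', 'n', 'g', ' ', 't', 'o', 'o'].length : Nat) : Int) - 1 = a - ((['[', 'C', 'a', 'l', 'l', 'i', 'n', 'g', ' ', 't', 'o', 'o'].length : Nat) : Int) from fun a => by simp; omega]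
  rw [pv_check_eq pre line ['[', 'C', 'a', 'l', 'l', 'i', 'n', 'g', ' ', 't', 'o', 'o'] hnl hpre (fun c hc => by fin_cases hc <;> simp) (by decide)]
  rw [show ∀ a : Int, a - ((['C', 'a', 'l', 'l', 'i', 'n', 'g', ' ', 't', 'o', 'o', 'l'].length : Nat) : Int) - 1 = a - ((['[', 'C', 'a', 'l', 'l', 'i', 'n', 'g', ' ', 't', 'o', 'o', 'l'].length : Nat) : Int) from fun a => by simp; omega]
  rw [pv_check_eq pre line ['[', 'C', 'a', 'l', 'l', 'i', 'n', 'g', ' ', 't', 'o', 'o', 'l'] hnl hpre (fun c hc => by fin_cases hc <;> simp) (by decide)]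
  rw [pv_check_eq pre line ['C'] hnl hpre (fun c hc => by fin_cases hc <;> simp) (by decide)]
  rw [pv_check_eq pre line ['C', 'a'] hnl hpre (fun c hc => by fin_cases hc <;> simp) (by decide)]
  rw [pv_check_eq pre line ['C', 'a', 'l'] hnl hpre (fun c hc => by fin_cases hc <;> simp) (by decide)]
  rw [pv_check_eq pre line ['C', 'a', 'l', 'l'] hnl hpre (fun c hc => by fin_cases hc <;> simp) (by decide)]
  rw [pv_check_eq pre line ['C', 'a', 'l', 'l', 'i'] hnl hpre (fun c hc => by fin_cases hc <;> simp) (by decide)]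
  rw [pv_check_eq pre line ['C', 'a', 'l', 'l', 'i', 'n'] hnl hpre (fun c hc => by fin_cases hc <;> simp) (by decide)]
  rw [pv_check_eq pre line ['C', 'a', 'l', 'l', 'i', 'n', 'g'] hnl hpre (fun c hc => by fin_cases hc <;> simp) (by decide)]
  rw [pv_check_eq pre line ['C', 'a', 'l', 'l', 'i', 'n', 'g', ' '] hnl hpre (fun c hc => by fin_cases hc <;> simp) (by decide)]
  rw [pv_check_eq pre line ['C', 'a', 'l', 'l', 'i', 'n', 'g', ' ', 't'] hnl hpre (fun c hc => by fin_cases hc <;> simp) (by decide)]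
  rw [pv_check_eq pre line ['C', 'a', 'l', 'l', 'i', 'n', 'g', ' ', 't', 'o'] hnl hpre (fun c hc => by fin_cases hc <;> simp) (by decide)]
  rw [pv_check_eq pre line ['C', 'a', 'l', 'l', 'i', 'n', 'g', ' ', 't', 'o', 'o'] hnl hpre (fun c hc => by fin_cases hc <;> simp) (by decide)]
  rw [pv_check_eq pre line ['C', 'a', 'l', 'l', 'i', 'n', 'g', ' ', 't', 'o', 'o', 'l'] hnl hpre (fun c hc => by fin_cases hc <;> simp) (by decide)]
  rw [show ∀ a : Int, a - 1 = a - ((['['].length : Nat) : Int) from fun a => by simp]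
  rw [pv_check_eq pre line ['['] hnl hpre (fun c hc => by fin_cases hc <;> simp) (by decide)]
  rfl


theorem pv_prefix_enum (s : List Char) (hs : s ≠ []) :
    (s ≠ "Calling tool:".toList ∧ s <+: "Calling tool:".toList) ↔ (((((((((((s = ['C'] ∨ s = ['C', 'a']) ∨ s = ['C', 'a', 'l']) ∨ s = ['C', 'a', 'l', 'l']) ∨ s = ['C', 'a', 'l', 'l', 'i']) ∨ s = ['C', 'a', 'l', 'l', 'i', 'n']) ∨ s = ['C', 'a', 'l', 'l', 'i', 'n', 'g']) ∨ s = ['C', 'a', 'l', 'l', 'i', 'n', 'g', ' ']) ∨ s = ['C', 'a', 'l', 'l', 'i', 'n', 'g', ' ', 't']) ∨ s = ['C', 'a', 'l', 'l', 'i', 'n', 'g', ' ', 't', 'o']) ∨ s = ['C', 'a', 'l', 'l', 'i', 'n', 'g', ' ', 't', 'o', 'o']) ∨ s = ['C', 'a', 'l', 'l', 'i', 'n', 'g', ' ', 't', 'o', 'o', 'l']) := by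
  constructor
  · rintro ⟨hne, hp⟩
    have hlen : s.length ≤ 13 := by simpa using hp.length_le
    have hlen0 : s.length ≠ 0 := by simpa using hs
    have hlen13 : s.length ≠ 13 := by
      intro h
      exact hne (hp.eq_of_length (by simp [h]))
    have hs' : s = List.take s.length "Calling tool:".toList := List.prefix_iff_eq_take.1 hp
    have h1 : 1 ≤ s.length := by omega
    have h2 : s.length ≤ 12 := by omega
    set n := s.length with hn
    clear_value n
    clear hn hlen hlen0 hlen13 hne hp hs
    interval_cases n <;> subst hs' <;> decide
  · rintro (((((((((((h | h) | h) | h) | h) | h) | h) | h) | h) | h) | h) | h) <;> subst h <;> exact ⟨by decide, by decide⟩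

theorem pv_B_val (pre line : List Char) (hnl : pvNoNL line) (hpre : pvPreOK pre) :
    (let nl := max (PySem.Chars.rfind (pre ++ line) ['\n']) (PySem.Chars.rfind (pre ++ line) ['\r']) + 1;
     let content := PySem.Chars.lstrip (PySem.Chars.slice (pre ++ line) (some nl) none);
     if content.isEmpty then false
     else if content == ['['] then true
     else
       let stripped := if PySem.Chars.startswith content ['['] then PySem.Chars.slice content (some 1) none
         else content
       !stripped.isEmpty && stripped != "Calling tool:".toList && PySem.Chars.startswith "Calling tool:".toList stripped)
      = pvContentCheckB (PySem.Chars.lstrip line) := by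
  have hn : PySem.Chars.rfind (pre ++ line) ['\n'] = PySem.Chars.rfind pre ['\n'] :=
    pv_rfind_append _ _ _ (fun h => (hnl _ h).1 rfl)
  have hr : PySem.Chars.rfind (pre ++ line) ['\r'] = PySem.Chars.rfind pre ['\r'] :=
    pv_rfind_append _ _ _ (fun h => (hnl _ h).2 rfl)
  simp only [hn, hr, pv_linestart pre hpre]
  simp only [PySem.Chars.slice_eq_listSlice]
  rw [PySem.List.slice_from _ (by positivity), Int.toNat_natCast, List.drop_left]
  rfl

theorem pv_AB (c : List Char) :
    (if c == ['['] then true else pvOrTree c) = pvContentCheckB c := by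
  rcases c with _ | ⟨h, rest⟩
  · decide
  · by_cases hb : h :: rest = ['[']
    · rw [hb]; decide
    · rw [if_neg (by simpa using hb)]
      unfold pvContentCheckB
      rw [if_neg (by simp), if_neg (by simpa using hb)]
      rw [Bool.eq_iff_iff]
      simp only [pvOrTree, Bool.or_eq_true, beq_iff_eq]
      by_cases hh : h = '['
      · subst hh
        have hrne : rest ≠ [] := fun h0 => hb (by rw [h0])
        rw [if_pos (by simp [PySem.Chars.startswith, List.isPrefixOf])]
        rw [show PySem.Chars.slice ('[' :: rest) (some 1) none = rest from by
          rw [PySem.Chars.slice_eq_listSlice, PySem.List.slice_from _ (by norm_num)]; rfl]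
        simp only [show (('[' :: rest : List Char) = ['C']) ↔ False from
          ⟨fun he => absurd (List.cons.inj he).1 (by decide), False.elim⟩]
        simp only [show (('[' :: rest : List Char) = ['C', 'a']) ↔ False from
          ⟨fun he => absurd (List.cons.inj he).1 (by decide), False.elim⟩]
        simp only [show (('[' :: rest : List Char) = ['C', 'a', 'l']) ↔ False from
          ⟨fun he => absurd (List.cons.inj he).1 (by decide), False.elim⟩]
        simp only [show (('[' :: rest : List Char) = ['C', 'a', 'l', 'l']) ↔ False from
          ⟨fun he => absurd (List.cons.inj he).1 (by decide), False.elim⟩]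
        simp only [show (('[' :: rest : List Char) = ['C', 'a', 'l', 'l', 'i']) ↔ False from
          ⟨fun he => absurd (List.cons.inj he).1 (by decide), False.elim⟩]
        simp only [show (('[' :: rest : List Char) = ['C', 'a', 'l', 'l', 'i', 'n']) ↔ False from
          ⟨fun he => absurd (List.cons.inj he).1 (by decide), False.elim⟩]
        simp only [show (('[' :: rest : List Char) = ['C', 'a', 'l', 'l', 'i', 'n', 'g']) ↔ False from
          ⟨fun he => absurd (List.cons.inj he).1 (by decide), False.elim⟩]
        simp only [show (('[' :: rest : List Char) = ['C', 'a', 'l', 'l', 'i', 'n', 'g', ' ']) ↔ False from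
          ⟨fun he => absurd (List.cons.inj he).1 (by decide), False.elim⟩]
        simp only [show (('[' :: rest : List Char) = ['C', 'a', 'l', 'l', 'i', 'n', 'g', ' ', 't']) ↔ False from
          ⟨fun he => absurd (List.cons.inj he).1 (by decide), False.elim⟩]
        simp only [show (('[' :: rest : List Char) = ['C', 'a', 'l', 'l', 'i', 'n', 'g', ' ', 't', 'o']) ↔ False from
          ⟨fun he => absurd (List.cons.inj he).1 (by decide), False.elim⟩]
        simp only [show (('[' :: rest : List Char) = ['C', 'a', 'l', 'l', 'i', 'n', 'g', ' ', 't', 'o', 'o']) ↔ False from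
          ⟨fun he => absurd (List.cons.inj he).1 (by decide), False.elim⟩]
        simp only [show (('[' :: rest : List Char) = ['C', 'a', 'l', 'l', 'i', 'n', 'g', ' ', 't', 'o', 'o', 'l']) ↔ False from
          ⟨fun he => absurd (List.cons.inj he).1 (by decide), False.elim⟩]
        simp only [show (('[' :: rest : List Char) = ['[', 'C']) ↔ rest = ['C'] from
          ⟨fun he => (List.cons.inj he).2, fun hr => by rw [hr]⟩]
        simp only [show (('[' :: rest : List Char) = ['[', 'C', 'a']) ↔ rest = ['C', 'a'] from
          ⟨fun he => (List.cons.inj he).2, fun hr => by rw [hr]⟩]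
        simp only [show (('[' :: rest : List Char) = ['[', 'C', 'a', 'l']) ↔ rest = ['C', 'a', 'l'] from
          ⟨fun he => (List.cons.inj he).2, fun hr => by rw [hr]⟩]
        simp only [show (('[' :: rest : List Char) = ['[', 'C', 'a', 'l', 'l']) ↔ rest = ['C', 'a', 'l', 'l'] from
          ⟨fun he => (List.cons.inj he).2, fun hr => by rw [hr]⟩]
        simp only [show (('[' :: rest : List Char) = ['[', 'C', 'a', 'l', 'l', 'i']) ↔ rest = ['C', 'a', 'l', 'l', 'i'] from
          ⟨fun he => (List.cons.inj he).2, fun hr => by rw [hr]⟩]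
        simp only [show (('[' :: rest : List Char) = ['[', 'C', 'a', 'l', 'l', 'i', 'n']) ↔ rest = ['C', 'a', 'l', 'l', 'i', 'n'] from
          ⟨fun he => (List.cons.inj he).2, fun hr => by rw [hr]⟩]
        simp only [show (('[' :: rest : List Char) = ['[', 'C', 'a', 'l', 'l', 'i', 'n', 'g']) ↔ rest = ['C', 'a', 'l', 'l', 'i', 'n', 'g'] from
          ⟨fun he => (List.cons.inj he).2, fun hr => by rw [hr]⟩]
        simp only [show (('[' :: rest : List Char) = ['[', 'C', 'a', 'l', 'l', 'i', 'n', 'g', ' ']) ↔ rest = ['C', 'a', 'l', 'l', 'i', 'n', 'g', ' '] from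
          ⟨fun he => (List.cons.inj he).2, fun hr => by rw [hr]⟩]
        simp only [show (('[' :: rest : List Char) = ['[', 'C', 'a', 'l', 'l', 'i', 'n', 'g', ' ', 't']) ↔ rest = ['C', 'a', 'l', 'l', 'i', 'n', 'g', ' ', 't'] from
          ⟨fun he => (List.cons.inj he).2, fun hr => by rw [hr]⟩]
        simp only [show (('[' :: rest : List Char) = ['[', 'C', 'a', 'l', 'l', 'i', 'n', 'g', ' ', 't', 'o']) ↔ rest = ['C', 'a', 'l', 'l', 'i', 'n', 'g', ' ', 't', 'o'] from
          ⟨fun he => (List.cons.inj he).2, fun hr => by rw [hr]⟩]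
        simp only [show (('[' :: rest : List Char) = ['[', 'C', 'a', 'l', 'l', 'i', 'n', 'g', ' ', 't', 'o', 'o']) ↔ rest = ['C', 'a', 'l', 'l', 'i', 'n', 'g', ' ', 't', 'o', 'o'] from
          ⟨fun he => (List.cons.inj he).2, fun hr => by rw [hr]⟩]
        simp only [show (('[' :: rest : List Char) = ['[', 'C', 'a', 'l', 'l', 'i', 'n', 'g', ' ', 't', 'o', 'o', 'l']) ↔ rest = ['C', 'a', 'l', 'l', 'i', 'n', 'g', ' ', 't', 'o', 'o', 'l'] from
          ⟨fun he => (List.cons.inj he).2, fun hr => by rw [hr]⟩]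
        simp only [false_or]
        simp only [Bool.and_eq_true, bne_iff_ne, ne_eq, Bool.not_eq_eq_eq_not, Bool.not_true,
          List.isEmpty_eq_false_iff, PySem.Chars.startswith_iff]
        constructor
        · intro hd
          have h2 := (pv_prefix_enum rest hrne).2 hd
          exact ⟨⟨hrne, h2.1⟩, h2.2⟩
        · rintro ⟨⟨h0, h1⟩, h2⟩
          exact (pv_prefix_enum rest hrne).1 ⟨h1, h2⟩
      · rw [if_neg (by
          simp only [PySem.Chars.startswith, List.isPrefixOf, Bool.and_eq_true, beq_iff_eq]
          intro hcon
          exact hh hcon.1.symm)]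
        simp only [show ((h :: rest : List Char) = ['[', 'C']) ↔ False from
          ⟨fun he => hh (List.cons.inj he).1, False.elim⟩]
        simp only [show ((h :: rest : List Char) = ['[', 'C', 'a']) ↔ False from
          ⟨fun he => hh (List.cons.inj he).1, False.elim⟩]
        simp only [show ((h :: rest : List Char) = ['[', 'C', 'a', 'l']) ↔ False from
          ⟨fun he => hh (List.cons.inj he).1, False.elim⟩]
        simp only [show ((h :: rest : List Char) = ['[', 'C', 'a', 'l', 'l']) ↔ False from
          ⟨fun he => hh (List.cons.inj he).1, False.elim⟩]
        simp only [show ((h :: rest : List Char) = ['[', 'C', 'a', 'l', 'l', 'i']) ↔ False from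
          ⟨fun he => hh (List.cons.inj he).1, False.elim⟩]
        simp only [show ((h :: rest : List Char) = ['[', 'C', 'a', 'l', 'l', 'i', 'n']) ↔ False from
          ⟨fun he => hh (List.cons.inj he).1, False.elim⟩]
        simp only [show ((h :: rest : List Char) = ['[', 'C', 'a', 'l', 'l', 'i', 'n', 'g']) ↔ False from
          ⟨fun he => hh (List.cons.inj he).1, False.elim⟩]
        simp only [show ((h :: rest : List Char) = ['[', 'C', 'a', 'l', 'l', 'i', 'n', 'g', ' ']) ↔ False from
          ⟨fun he => hh (List.cons.inj he).1, False.elim⟩]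
        simp only [show ((h :: rest : List Char) = ['[', 'C', 'a', 'l', 'l', 'i', 'n', 'g', ' ', 't']) ↔ False from
          ⟨fun he => hh (List.cons.inj he).1, False.elim⟩]
        simp only [show ((h :: rest : List Char) = ['[', 'C', 'a', 'l', 'l', 'i', 'n', 'g', ' ', 't', 'o']) ↔ False from
          ⟨fun he => hh (List.cons.inj he).1, False.elim⟩]
        simp only [show ((h :: rest : List Char) = ['[', 'C', 'a', 'l', 'l', 'i', 'n', 'g', ' ', 't', 'o', 'o']) ↔ False from
          ⟨fun he => hh (List.cons.inj he).1, False.elim⟩]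
        simp only [show ((h :: rest : List Char) = ['[', 'C', 'a', 'l', 'l', 'i', 'n', 'g', ' ', 't', 'o', 'o', 'l']) ↔ False from
          ⟨fun he => hh (List.cons.inj he).1, False.elim⟩]
        simp only [or_false]
        simp only [Bool.and_eq_true, bne_iff_ne, ne_eq, Bool.not_eq_eq_eq_not, Bool.not_true,
          List.isEmpty_eq_false_iff, PySem.Chars.startswith_iff]
        constructor
        · intro hd
          have h2 := (pv_prefix_enum (h :: rest) (by simp)).2 hd
          exact ⟨⟨by simp, h2.1⟩, h2.2⟩
        · rintro ⟨⟨h0, h1⟩, h2⟩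
          exact (pv_prefix_enum (h :: rest) (by simp)).1 ⟨h1, h2⟩

-- ===== VERDICT (by name: the statement is the Claim_ definition above) =====
theorem has_partial_calling_tool_marker_py_spec : Claim_equal_has_partial_calling_tool_marker_py := by
  intro text _
  show has_partial_calling_tool_marker_py text = has_partial_calling_tool_marker_py_alt text
  obtain ⟨pre, line, ht, hnl, hpre⟩ := pv_decomp (PySem.Chars.rstrip text.toList)
  unfold has_partial_calling_tool_marker_py has_partial_calling_tool_marker_py_alt
  rw [ht]
  exact (pv_A_val pre line hnl hpre).trans ((pv_AB _).trans (pv_B_val pre line hnl hpre).symm)
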